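-- pv_equiv track=rewrite | github.com/runnz121/for_coding_test | kakaoMobility02.py | solution
-- ===== SOURCE A (Python) =====
-- def solution(id_list, k):
--     answer = 0
--
--     db = dict()
--
--     for i in id_list:
--         tmp = set(i.split())
--         tmp = list(tmp)
--         for custom in tmp:
--             if custom in db:
--                 if db[custom] < k:
--                     db[custom] += 1
--             else:
--                 db[custom] = 1
--     for key, val in db.items():
--         answer += val
--
--     return answer
-- ===== SOURCE B (Python) =====
-- def solution(id_list, k):
--     toks = []
--     for i in id_list:
--         toks.extend(set(i.split()))
--     toks.sort()
--     answer = 0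
--     run = 0
--     prev = None
--     for t in toks:
--         if t == prev:
--             run += 1
--         else:
--             answer += min(run, k)
--             run = 1
--             prev = t
--     return answer + min(run, k)
-- ===== Notes on version B (the rewrite author's own statement) =====
-- stated objective: alternative
-- what changed: B replaces A's hash-dict counting entirely: it flattens the per-id deduplicated tokens into one list, sorts it, and computes the answer by a single run-length scan over the sorted list adding min(run, k) per run of equal tokens (sort-then-scan, no dictionary at all); Pre_ restricts to the natural domain k >= 1, where a cap is meaningful.
-- outside the precondition, e.g. on solution(['a'], 0): A returns 1, B returns 0; on solution(['c91 z0'], -1): A returns 2, B returns -3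
import Mathlib
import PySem

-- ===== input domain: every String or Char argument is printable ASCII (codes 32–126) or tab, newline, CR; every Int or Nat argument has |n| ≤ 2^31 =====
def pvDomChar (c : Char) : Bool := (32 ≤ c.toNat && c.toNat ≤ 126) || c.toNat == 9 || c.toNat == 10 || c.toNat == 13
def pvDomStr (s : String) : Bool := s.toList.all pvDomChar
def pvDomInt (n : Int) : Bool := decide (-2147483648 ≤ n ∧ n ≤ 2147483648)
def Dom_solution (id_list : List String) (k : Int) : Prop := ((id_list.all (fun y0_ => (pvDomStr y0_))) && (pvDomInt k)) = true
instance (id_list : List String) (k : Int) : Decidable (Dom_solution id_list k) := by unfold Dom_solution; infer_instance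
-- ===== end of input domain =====

-- B replaces A's dict counting by sort-then-scan: flatten the per-id deduplicated tokens,
-- sort them, and add min(run, k) per run of equal tokens; Pre_ restricts to the natural domain k ≥ 1.


-- ===== PORT A =====
def solution (id_list : List String) (k : Int) : Int :=
  let db : PySem.Dict String Int :=
    id_list.foldl (fun db i =>
      let tmp : List String := PySem.Set.ofList (PySem.Str.split₀ i)
      tmp.foldl (fun db custom =>
        if db.contains custom then
          (if db.getD custom 0 < k then db.insert custom (db.getD custom 0 + 1) else db)
        else db.insert custom 1) db) PySem.Dict.empty
  db.items.foldl (fun answer p => answer + p.2) 0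

-- ===== PORT B =====
def solution_alt (id_list : List String) (k : Int) : Int :=
  let toks : List String :=
    id_list.foldl (fun toks i => toks ++ PySem.Set.ofList (PySem.Str.split₀ i)) []
  let toks := PySem.List.sorted toks (fun x => x) false
  let st : Int × Int × Option String :=
    toks.foldl (fun st t =>
      if some t = st.2.2 then (st.1, st.2.1 + 1, st.2.2)
      else (st.1 + min st.2.1 k, 1, some t)) (0, 0, none)
  st.1 + min st.2.1 k

-- ===== PRECONDITION & SPEC =====
-- Pre_ restricts to the problem's natural domain of a positive cap: for k < 1 no behaviour is specified
-- and the two defensible readings part ways (A still records each distinct token once, B's cap gives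
-- min(1,k) per token), so such k lie outside the claim.
def Pre_solution (id_list : List String) (k : Int) : Prop := 1 ≤ k
instance (id_list : List String) (k : Int) : Decidable (Pre_solution id_list k) := by unfold Pre_solution; infer_instance
def pvWitness_solution : List String × Int := (["a b", "a"], 1)
def Spec_solution (id_list : List String) (k : Int) (out : Int) : Prop := out = solution_alt id_list k
instance (id_list : List String) (k : Int) (out : Int) : Decidable (Spec_solution id_list k out) := by unfold Spec_solution; infer_instance

-- ===== CLAIM (what is proved, stated in full; the proofs are below) =====
def Claim_equal_solution : Prop := ∀ (id_list : List String) (k : Int), Dom_solution id_list k → Pre_solution id_list k → Spec_solution id_list k (solution id_list k)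

-- ===== LEMMAS AND PROOFS =====

-- all per-id deduplicated tokens, flattened
def pvToks (id_list : List String) : List String :=
  id_list.flatMap (fun i => PySem.Set.ofList (PySem.Str.split₀ i))

-- the common value both programs compute (for k ≥ 1): sum over distinct tokens of min(count, k)
def pvS (k : Int) (l : List String) : Int :=
  ((PySem.Set.ofList l).map (fun t => min (l.count t : Int) k)).sum

-- the value map applied to the uncapped counter's items to obtain A's items
def pvCap (k : Int) (p : String × Int) : String × Int := (p.1, min p.2 k)

-- the per-token step of A's loop and of the uncapped counting loop it is related to
def pvStepA (k : Int) (db : PySem.Dict String Int) (custom : String) : PySem.Dict String Int :=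
  if db.contains custom then
    (if db.getD custom 0 < k then db.insert custom (db.getD custom 0 + 1) else db)
  else db.insert custom 1

def pvStepB (c : PySem.Dict String Int) (tok : String) : PySem.Dict String Int :=
  c.insert tok (c.getD tok 0 + 1)

-- B's scan step
def pvScan (k : Int) (st : Int × Int × Option String) (t : String) : Int × Int × Option String :=
  if some t = st.2.2 then (st.1, st.2.1 + 1, st.2.2)
  else (st.1 + min st.2.1 k, 1, some t)

-- a nested fold over the per-id token sets is the flat fold over pvToks
lemma pvFoldl_flatMap {α β σ : Type} (g : α → List β) (f : σ → β → σ) (l : List α) (d : σ) :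
    l.foldl (fun s a => (g a).foldl f s) d = (l.flatMap g).foldl f d := by
  induction l generalizing d with
  | nil => rfl
  | cons a l ih => simp [List.flatMap_cons, List.foldl_append, ih]

-- invariant tying A's dict to the uncapped counter
def pvRel (k : Int) (d c : PySem.Dict String Int) : Prop :=
  d.items = c.items.map (pvCap k) ∧ (∀ p ∈ c.items, 1 ≤ p.2) ∧ c.keys.Nodup

lemma pvKeys_map_cap (k : Int) (c : PySem.Dict String Int) (d : PySem.Dict String Int)
    (hd : d.items = c.items.map (pvCap k)) : d.keys = c.keys := by
  simp only [PySem.Dict.keys, hd, List.map_map]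
  rfl

lemma pvStep_rel {k : Int} (hk : 1 ≤ k) (d c : PySem.Dict String Int) (t : String)
    (h : pvRel k d c) : pvRel k (pvStepA k d t) (pvStepB c t) := by
  obtain ⟨hd, hpos, hnd⟩ := h
  have hkeys : d.keys = c.keys := pvKeys_map_cap k c d hd
  have hcont : d.contains t = c.contains t := by
    simp [PySem.Dict.contains_eq_decide_mem_keys, hkeys]
  by_cases hc : c.contains t = true
  · -- t already counted
    obtain ⟨v, hv⟩ : ∃ v, c.get? t = some v := by
      cases hgv : c.get? t with
      | none => exact absurd ((PySem.Dict.get?_eq_none_iff_contains c t).mp hgv) (by simp [hc])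
      | some v => exact ⟨v, rfl⟩
    have hmem : (t, v) ∈ c.items := PySem.Dict.mem_items_of_get?_eq_some c hv
    have hgetD : c.getD t 0 = v := by simp [PySem.Dict.getD_eq_get?_getD, hv]
    have hv1 : 1 ≤ v := hpos _ hmem
    have huniq : ∀ p ∈ c.items, p.1 = t → p.2 = v := by
      intro p hp hpt
      have h2 : c.get? p.1 = some p.2 := PySem.Dict.get?_of_mem_items c (by simpa using hp) hnd
      rw [hpt, hv] at h2; exact (Option.some_injective _ h2).symm
    have hdmem : (t, min v k) ∈ d.items := by
      rw [hd]; exact List.mem_map.mpr ⟨(t, v), hmem, rfl⟩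
    have hdnd : d.keys.Nodup := by rw [hkeys]; exact hnd
    have hdget : d.getD t 0 = min v k := PySem.Dict.getD_of_mem_items d hdmem hdnd 0
    have hdc : d.contains t = true := by rw [hcont]; exact hc
    have hBitems : (pvStepB c t).items
        = c.items.map (fun p => if p.1 == t then (t, v + 1) else p) := by
      show (c.insert t (c.getD t 0 + 1)).items = _
      rw [hgetD, PySem.Dict.items_insert_of_contains c (v + 1) hc]
    refine ⟨?_, ?_, ?_⟩
    · rw [hBitems, List.map_map]
      by_cases hvk : v < k
      · have hA : pvStepA k d t = d.insert t (min v k + 1) := by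
          simp [pvStepA, hdc, hdget, show min v k < k from by omega]
        rw [hA, PySem.Dict.items_insert_of_contains d (min v k + 1) hdc, hd, List.map_map]
        refine List.map_congr_left ?_
        intro p hp
        by_cases hpt : p.1 = t
        · have hpv := huniq p hp hpt
          have hpp : p = (p.1, p.2) := rfl
          rw [hpp, hpt, hpv]
          simp [Function.comp, pvCap]
          omega
        · simp [Function.comp, pvCap, hpt]
      · have hA : pvStepA k d t = d := by
          simp [pvStepA, hdc, hdget, show ¬ (min v k < k) from by omega]
        rw [hA, hd]
        refine List.map_congr_left ?_
        intro p hp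
        by_cases hpt : p.1 = t
        · have hpv := huniq p hp hpt
          have : p = (p.1, p.2) := rfl
          rw [this, hpt, hpv]
          simp [Function.comp, pvCap]
          omega
        · simp [Function.comp, pvCap, hpt]
    · intro p hp
      rw [hBitems] at hp
      obtain ⟨q, hq, rfl⟩ := List.mem_map.mp hp
      by_cases hpt : q.1 = t
      · simp only [hpt, beq_self_eq_true, if_true]; omega
      · rw [if_neg (by simpa using hpt)]
        exact hpos _ hq
    · have := PySem.Dict.nodup_keys_insert c t (c.getD t 0 + 1) hnd
      simpa [pvStepB] using this
  · -- fresh token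
    have hc' : c.contains t = false := by simpa using hc
    have hdc : d.contains t = false := by rw [hcont]; exact hc'
    have hgd : c.getD t 0 = 0 := PySem.Dict.getD_of_not_contains c 0 hc'
    have hB : pvStepB c t = c.insert t 1 := by simp [pvStepB, hgd]
    refine ⟨?_, ?_, ?_⟩
    · have hA : pvStepA k d t = d.insert t 1 := by simp [pvStepA, hdc]
      rw [hA, hB, PySem.Dict.items_insert_of_not_contains d 1 hdc,
          PySem.Dict.items_insert_of_not_contains c 1 hc', hd, List.map_append]
      simp [pvCap, min_eq_left hk]
    · intro p hp
      rw [hB, PySem.Dict.items_insert_of_not_contains c 1 hc'] at hp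
      rcases List.mem_append.mp hp with h | h
      · exact hpos _ h
      · have hp1 : p = (t, 1) := List.mem_singleton.mp h
        rw [hp1]
    · have := PySem.Dict.nodup_keys_insert c t (c.getD t 0 + 1) hnd
      simpa [pvStepB] using this

lemma pvFold_rel {k : Int} (hk : 1 ≤ k) (ts : List String) (d c : PySem.Dict String Int)
    (h : pvRel k d c) : pvRel k (ts.foldl (pvStepA k) d) (ts.foldl pvStepB c) := by
  induction ts generalizing d c with
  | nil => exact h
  | cons t ts ih => exact ih _ _ (pvStep_rel hk d c t h)

lemma pvRel_empty (k : Int) : pvRel k PySem.Dict.empty PySem.Dict.empty := by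
  refine ⟨?_, ?_, ?_⟩ <;> simp [PySem.Dict.empty, PySem.Dict.keys]

-- A computes pvS k (pvToks id_list)
lemma pvA_eq_S {k : Int} (hk : 1 ≤ k) (id_list : List String) :
    solution id_list k = pvS k (pvToks id_list) := by
  unfold solution
  have hflat :
      id_list.foldl (fun db i =>
        (PySem.Set.ofList (PySem.Str.split₀ i)).foldl (pvStepA k) db) PySem.Dict.empty
      = (pvToks id_list).foldl (pvStepA k) PySem.Dict.empty :=
    pvFoldl_flatMap _ _ id_list _
  have hrel := pvFold_rel hk (pvToks id_list) _ _ (pvRel_empty k)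
  obtain ⟨hitems, -, -⟩ := hrel
  have hfun : pvStepB = fun (d : PySem.Dict String Int) x => d.insert x (d.getD x 0 + 1) := by
    funext d x; rfl
  have hcnt : (pvToks id_list).foldl pvStepB PySem.Dict.empty = PySem.Dict.counter (pvToks id_list) := by
    rw [hfun]
    exact PySem.Dict.foldl_insert_getD_add_one_eq_counter (pvToks id_list)
  rw [hcnt, PySem.Dict.items_counter] at hitems
  show ((id_list.foldl (fun db i =>
        (PySem.Set.ofList (PySem.Str.split₀ i)).foldl (pvStepA k) db) PySem.Dict.empty).items.foldl
      (fun answer p => answer + p.2) 0 : Int) = _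
  rw [hflat,
    PySem.List.foldl_add ((pvToks id_list).foldl (pvStepA k) PySem.Dict.empty).items
      (fun p : String × Int => p.2) 0,
    hitems, zero_add]
  unfold pvS
  rw [List.map_map, List.map_map]
  refine congrArg List.sum (List.map_congr_left ?_)
  intro t _
  simp [Function.comp, pvCap]

-- pvS only depends on the multiset of tokens
lemma pvS_perm (k : Int) {l l' : List String} (h : l.Perm l') : pvS k l = pvS k l' := by
  unfold pvS
  have hmemiff : ∀ x, x ∈ PySem.Set.ofList l ↔ x ∈ PySem.Set.ofList l' := by
    intro x
    simp only [PySem.Set.mem_ofList]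
    exact ⟨fun hx => h.mem_iff.mp hx, fun hx => h.mem_iff.mpr hx⟩
  have hperm : (PySem.Set.ofList l).Perm (PySem.Set.ofList l') :=
    (List.perm_ext_iff_of_nodup (PySem.Set.nodup_ofList l) (PySem.Set.nodup_ofList l')).mpr hmemiff
  have hcount : ∀ t : String, l.count t = l'.count t := fun t => h.count_eq t
  calc ((PySem.Set.ofList l).map (fun t => min (l.count t : Int) k)).sum
      = ((PySem.Set.ofList l).map (fun t => min (l'.count t : Int) k)).sum := by
        refine congrArg List.sum (List.map_congr_left ?_)
        intro t _; rw [hcount t]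
    _ = ((PySem.Set.ofList l').map (fun t => min (l'.count t : Int) k)).sum :=
        (hperm.map _).sum_eq

-- peeling the first run's head off pvS
lemma pvS_cons (k : Int) (x : String) (xs : List String) :
    pvS k (x :: xs) = min ((xs.count x : Int) + 1) k + pvS k (xs.filter (fun y => !(y == x))) := by
  unfold pvS
  have hfmem : ∀ t : String, t ∈ xs.filter (fun y => !(y == x)) ↔ t ∈ xs ∧ t ≠ x := by
    intro t; simp [List.mem_filter]
  have hperm : (PySem.Set.ofList (x :: xs)).Perm
      (x :: PySem.Set.ofList (xs.filter (fun y => !(y == x)))) := by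
    refine (List.perm_ext_iff_of_nodup (PySem.Set.nodup_ofList _) ?_).mpr ?_
    · refine List.nodup_cons.mpr ⟨?_, PySem.Set.nodup_ofList _⟩
      intro hx
      have := (hfmem x).mp (by simpa [PySem.Set.mem_ofList] using hx)
      exact this.2 rfl
    · intro t
      by_cases ht : t = x
      · subst ht; simp [PySem.Set.mem_ofList]
      · simp [PySem.Set.mem_ofList, hfmem, ht]
  have hsum := ((hperm.map (fun t => min (((x :: xs).count t : Int)) k)).sum_eq)
  rw [hsum]
  simp only [List.map_cons, List.sum_cons]
  have hx : ((x :: xs).count x : Int) = (xs.count x : Int) + 1 := by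
    rw [List.count_cons_self]; push_cast; ring
  rw [hx]
  refine congrArg (min ((xs.count x : Int) + 1) k + ·) ?_
  refine congrArg List.sum (List.map_congr_left ?_)
  intro t htm
  have ht : t ∈ xs ∧ t ≠ x := (hfmem t).mp (by simpa [PySem.Set.mem_ofList] using htm)
  have hxt : ¬ x = t := fun h => ht.2 h.symm
  have h1 : (x :: xs).count t = xs.count t := by
    rw [List.count_cons]; simp [hxt]
  have h2 : (xs.filter (fun y => !(y == x))).count t = xs.count t := by
    rw [List.count_filter]
    simp [ht.2]
  rw [h1, h2]

-- the run-length scan over a sorted suffix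
lemma pvScan_run (k : Int) : ∀ (l : List String), l.Pairwise (· ≤ ·) →
    ∀ (v : String), (∀ x ∈ l, v ≤ x) → ∀ (ans run : Int),
    (l.foldl (pvScan k) (ans, run, some v)).1 + min (l.foldl (pvScan k) (ans, run, some v)).2.1 k
      = ans + min (run + (l.count v : Int)) k + pvS k (l.filter (fun y => !(y == v))) := by
  intro l
  induction l with
  | nil =>
    intro _ v _ ans run
    simp [pvS, PySem.Set.ofList]
  | cons x xs ih =>
    intro hpw v hle ans run
    have hx_le : ∀ y ∈ xs, x ≤ y := fun y hy => (List.pairwise_cons.mp hpw).1 y hy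
    have hpw' : xs.Pairwise (· ≤ ·) := (List.pairwise_cons.mp hpw).2
    by_cases hxv : x = v
    · subst hxv
      have hstep : pvScan k (ans, run, some x) x = (ans, run + 1, some x) := by
        simp [pvScan]
      rw [List.foldl_cons, hstep]
      rw [ih hpw' x hx_le ans (run + 1)]
      have hc : ((x :: xs).count x : Int) = (xs.count x : Int) + 1 := by
        rw [List.count_cons_self]; push_cast; ring
      have hf : (x :: xs).filter (fun y => !(y == x)) = xs.filter (fun y => !(y == x)) := by
        simp
      rw [hf, hc]
      ring_nf
    · have hvx : v < x := lt_of_le_of_ne (hle x (List.mem_cons_self)) (fun h => hxv h.symm)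
      have hstep : pvScan k (ans, run, some v) x = (ans + min run k, 1, some x) := by
        simp [pvScan, fun h : x = v => hxv h]
      rw [List.foldl_cons, hstep]
      rw [ih hpw' x hx_le (ans + min run k) 1]
      have hvnot : ∀ y ∈ x :: xs, v < y := by
        intro y hy
        rcases List.mem_cons.mp hy with rfl | hy'
        · exact hvx
        · exact lt_of_lt_of_le hvx (hx_le y hy')
      have hcv : ((x :: xs).count v : Int) = 0 := by
        have : (x :: xs).count v = 0 := by
          rw [List.count_eq_zero]
          intro hv
          exact absurd (hvnot v hv) (lt_irrefl v)
        rw [this]; rfl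
      have hfv : (x :: xs).filter (fun y => !(y == v)) = x :: xs := by
        rw [List.filter_eq_self]
        intro y hy
        simp [ne_of_gt (hvnot y hy)]
      rw [hcv, hfv, pvS_cons k x xs]
      have : min ((xs.count x : Int) + 1) k = min (1 + (xs.count x : Int)) k := by ring_nf
      rw [this]
      ring_nf

-- B computes pvS k (pvToks id_list)
lemma pvScan_total {k : Int} (hk : 1 ≤ k) (l : List String) (hpw : l.Pairwise (· ≤ ·)) :
    (l.foldl (pvScan k) (0, 0, none)).1 + min (l.foldl (pvScan k) (0, 0, none)).2.1 k
      = pvS k l := by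
  cases l with
  | nil =>
    simp [pvS, PySem.Set.ofList]
    omega
  | cons x rest =>
    have hx_le : ∀ y ∈ rest, x ≤ y := fun y hy => (List.pairwise_cons.mp hpw).1 y hy
    have hpw' : rest.Pairwise (· ≤ ·) := (List.pairwise_cons.mp hpw).2
    have hstep : pvScan k (0, 0, (none : Option String)) x = (min 0 k, 1, some x) := by
      simp [pvScan]
    rw [List.foldl_cons, hstep]
    have h0 : min (0 : Int) k = 0 := by omega
    rw [h0]
    rw [pvScan_run k rest hpw' x hx_le 0 1]
    rw [pvS_cons k x rest]
    have : min ((rest.count x : Int) + 1) k = min (1 + (rest.count x : Int)) k := by ring_nf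
    rw [this]
    ring_nf

lemma pvB_eq_S {k : Int} (hk : 1 ≤ k) (id_list : List String) :
    solution_alt id_list k = pvS k (pvToks id_list) := by
  have hfun : (fun (st : Int × Int × Option String) t =>
      if some t = st.2.2 then (st.1, st.2.1 + 1, st.2.2)
      else (st.1 + min st.2.1 k, 1, some t)) = pvScan k := by
    funext st t; rfl
  simp only [solution_alt]
  rw [PySem.List.foldl_append_eq_flatMap, hfun]
  have hperm : (PySem.List.sorted (pvToks id_list) (fun x => x) false).Perm (pvToks id_list) :=
    PySem.List.sorted_perm _ _ _
  have hpw : (PySem.List.sorted (pvToks id_list) (fun x => x) false).Pairwise (· ≤ ·) := by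
    have := PySem.List.sorted_pairwise (pvToks id_list) (fun x => x)
    simpa using this
  rw [← pvS_perm k hperm]
  exact pvScan_total hk _ hpw

-- ===== VERDICT (by name: the statement is the Claim_ definition above) =====
theorem solution_spec : Claim_equal_solution := by
  intro id_list k _ hk
  unfold Spec_solution
  rw [pvA_eq_S hk id_list, pvB_eq_S hk id_list]
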